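-- pv_equiv track=rewrite | github.com/nonlinear/librarian | engine/scripts/research.py | deduplicate_by_book
-- ===== SOURCE A (Python) =====
-- from typing import List, Dict, Optional, Tuple
-- from collections import defaultdict
--
-- def deduplicate_by_book(results: List[Dict], max_per_book: int = 2) -> Tuple[List[Dict], Dict[str, int]]:
--     """
--     Deduplicate results, keeping max N per book.
--
--     Args:
--         results: List of result dictionaries
--         max_per_book: Maximum results per book
--
--     Returns:
--         (deduplicated_results, book_distribution)
--     """
--     book_counts = defaultdict(int)
--     deduped = []
--
--     for result in results:
--         book_title = result.get('book_title', 'Unknown')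
--
--         if book_counts[book_title] < max_per_book:
--             deduped.append(result)
--             book_counts[book_title] += 1
--
--     # Convert to regular dict for JSON serialization
--     distribution = dict(book_counts)
--
--     return deduped, distribution
-- ===== SOURCE B (Python) =====
-- def deduplicate_by_book(results, max_per_book=2):
--     groups = {}
--     for i, result in enumerate(results):
--         groups.setdefault(result.get('book_title', 'Unknown'), []).append(i)
--     kept = set()
--     for positions in groups.values():
--         kept.update(positions[:max_per_book])
--     deduped = [result for i, result in enumerate(results) if i in kept]
--     distribution = {title: min(len(positions), max_per_book)
--                     for title, positions in groups.items()}
--     return deduped, distribution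
-- ===== Notes on version B (the rewrite author's own statement) =====
-- stated objective: alternative
-- what changed: Replaces A's single streaming loop with a mutable gated counter by a group-by pass: build a dict title -> list of positions, take the first max_per_book positions of each group into a kept set, emit the results whose index is kept, and read the distribution off the group sizes capped at max_per_book; Pre_ excludes negative max_per_book (outside the natural domain of a per-book limit), where A's value - keep nothing but record 0 for every seen title - is a defaultdict artifact while B's Python slice/min semantics give other values.
-- outside the precondition, e.g. on deduplicate_by_book([{}, {}], -1): A returns ([], {'Unknown': 0}), B returns ([{}], {'Unknown': -1})
import Mathlib
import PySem

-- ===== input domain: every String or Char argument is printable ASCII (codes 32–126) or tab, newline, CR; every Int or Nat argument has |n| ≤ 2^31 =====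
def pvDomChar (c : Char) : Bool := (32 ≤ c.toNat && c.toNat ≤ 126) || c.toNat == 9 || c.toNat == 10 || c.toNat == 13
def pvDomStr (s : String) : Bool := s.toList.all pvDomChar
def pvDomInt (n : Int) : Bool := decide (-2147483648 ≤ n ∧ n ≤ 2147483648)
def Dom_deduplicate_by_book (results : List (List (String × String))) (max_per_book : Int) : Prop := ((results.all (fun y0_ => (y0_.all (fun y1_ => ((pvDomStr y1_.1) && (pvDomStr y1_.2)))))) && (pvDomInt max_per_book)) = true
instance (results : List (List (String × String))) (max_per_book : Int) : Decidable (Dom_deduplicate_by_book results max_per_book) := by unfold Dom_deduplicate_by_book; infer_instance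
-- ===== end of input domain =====

-- B replaces A's streaming gated-counter loop by a group-by-title pass over positions
-- (first max_per_book positions of each group are kept, group sizes give the distribution);
-- alternative decomposition, not faster.

-- result.get('book_title', 'Unknown')  (shared by both Pythons verbatim)
def pvTitle (r : List (String × String)) : String :=
  (PySem.Dict.mk r).getD "book_title" "Unknown"

-- ===== PORT A =====
def deduplicate_by_book (results : List (List (String × String))) (max_per_book : Int) : (List (List (String × String))) × (List (String × Int)) :=
  let st := results.foldl
    (fun (st : PySem.Dict String Int × List (List (String × String))) result =>
      let book_title := pvTitle result
      -- defaultdict read: book_counts[book_title] inserts 0 when absent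
      let bc := st.1.setdefault book_title 0
      if bc.getD book_title 0 < max_per_book then
        (bc.insert book_title (bc.getD book_title 0 + 1), st.2 ++ [result])
      else (bc, st.2))
    (PySem.Dict.empty, [])
  (st.2, st.1.items)

-- ===== PORT B =====
-- the grouping loop of B: groups.setdefault(result.get('book_title','Unknown'), []).append(i)
def pvGroups (results : List (List (String × String))) : PySem.Dict String (List Int) :=
  (PySem.List.enumerate results 0).foldl
    (fun d p => d.insert (pvTitle p.2) (d.getD (pvTitle p.2) [] ++ [p.1]))
    PySem.Dict.empty

def deduplicate_by_book_alt (results : List (List (String × String))) (max_per_book : Int) : (List (List (String × String))) × (List (String × Int)) :=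
  let groups := pvGroups results
  -- kept.update(positions[:max_per_book])
  let kept : PySem.Set Int :=
    groups.values.foldl
      (fun s ps => PySem.Set.update s (PySem.List.slice ps none (some max_per_book)))
      PySem.Set.empty
  let deduped := ((PySem.List.enumerate results 0).filter
      (fun p => PySem.Set.contains kept p.1)).map (·.2)
  let distribution := groups.items.map (fun tp => (tp.1, min (tp.2.length : Int) max_per_book))
  (deduped, distribution)

-- ===== PRECONDITION & SPEC =====
-- Pre_ restricts to nonnegative max_per_book, the natural domain of a per-book limit:
-- for negative limits A's value (keep nothing, yet record 0 for every seen title) is a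
-- defaultdict artifact, while B's Python slice/min semantics yield other values there.
def Pre_deduplicate_by_book (results : List (List (String × String))) (max_per_book : Int) : Prop :=
  0 ≤ max_per_book
instance (results : List (List (String × String))) (max_per_book : Int) : Decidable (Pre_deduplicate_by_book results max_per_book) := by unfold Pre_deduplicate_by_book; infer_instance

def pvWitness_deduplicate_by_book : (List (List (String × String))) × Int :=
  ([[("book_title", "a")], [("book_title", "a")], [("book_title", "b")]], 1)

def Spec_deduplicate_by_book (results : List (List (String × String))) (max_per_book : Int) (out : (List (List (String × String))) × (List (String × Int))) : Prop := out = deduplicate_by_book_alt results max_per_book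
instance (results : List (List (String × String))) (max_per_book : Int) (out : (List (List (String × String))) × (List (String × Int))) : Decidable (Spec_deduplicate_by_book results max_per_book out) := by unfold Spec_deduplicate_by_book; infer_instance

-- ===== CLAIM (what is proved, stated in full; the proofs are below) =====
def Claim_equal_deduplicate_by_book : Prop := ∀ (results : List (List (String × String))) (max_per_book : Int), Dom_deduplicate_by_book results max_per_book → Pre_deduplicate_by_book results max_per_book → Spec_deduplicate_by_book results max_per_book (deduplicate_by_book results max_per_book)

-- ===== LEMMAS AND PROOFS =====

-- ---- A side: characterisation of the streaming gated-counter loop ----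

-- the counts-dict step of A, on titles only
def pvAstep (mpb : Int) (d : PySem.Dict String Int) (t : String) : PySem.Dict String Int :=
  if (d.setdefault t 0).getD t 0 < mpb then
    (d.setdefault t 0).insert t ((d.setdefault t 0).getD t 0 + 1)
  else d.setdefault t 0

def pvCap (mpb : Int) : Int := if mpb > 0 then mpb else 0

-- the full A fold's counts component is the titles fold
theorem pvCounts_fold (results : List (List (String × String))) (mpb : Int)
    (d : PySem.Dict String Int) (l : List (List (String × String))) :
    (results.foldl
      (fun (st : PySem.Dict String Int × List (List (String × String))) result =>
        let book_title := pvTitle result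
        let bc := st.1.setdefault book_title 0
        if bc.getD book_title 0 < mpb then
          (bc.insert book_title (bc.getD book_title 0 + 1), st.2 ++ [result])
        else (bc, st.2)) (d, l)).1
    = (results.map pvTitle).foldl (pvAstep mpb) d := by
  induction results generalizing d l with
  | nil => rfl
  | cons r rs ih =>
    simp only [List.foldl_cons, List.map_cons, pvAstep]
    split <;> exact ih _ _

theorem pvKeys_Astep (mpb : Int) (d : PySem.Dict String Int) (t : String) :
    (pvAstep mpb d t).keys = PySem.Set.add d.keys t := by
  unfold pvAstep
  by_cases h : d.contains t = true
  · rw [PySem.Dict.setdefault_of_contains d 0 h,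
      PySem.Set.add_of_mem ((PySem.Dict.contains_iff_mem_keys d t).mp h)]
    split
    · exact PySem.Dict.keys_insert_of_contains _ _ h
    · rfl
  · have h' : d.contains t = false := by simpa using h
    rw [PySem.Dict.setdefault_of_not_contains d 0 h',
      PySem.Set.add_of_not_mem (fun hm => h ((PySem.Dict.contains_iff_mem_keys d t).mpr hm))]
    split
    · rw [PySem.Dict.keys_insert_of_contains _ _ (PySem.Dict.contains_insert_self _ _ _),
        PySem.Dict.keys_insert_of_not_contains _ _ h']
    · exact PySem.Dict.keys_insert_of_not_contains _ _ h'

theorem pvKeys_fold (mpb : Int) (ts : List String) (d : PySem.Dict String Int) :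
    (ts.foldl (pvAstep mpb) d).keys = PySem.Set.update d.keys ts := by
  induction ts generalizing d with
  | nil => rfl
  | cons t ts ih =>
    rw [List.foldl_cons, PySem.Set.update_cons, ih, pvKeys_Astep]

theorem pvGetD_Astep_ne (mpb : Int) (d : PySem.Dict String Int) (s t : String) (h : t ≠ s) :
    (pvAstep mpb d s).getD t 0 = d.getD t 0 := by
  unfold pvAstep
  have hsd : (d.setdefault s 0).getD t 0 = d.getD t 0 := by
    rw [PySem.Dict.getD_eq_get?_getD, PySem.Dict.get?_setdefault_of_ne d 0 h,
      ← PySem.Dict.getD_eq_get?_getD]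
  split
  · rw [PySem.Dict.getD_insert_of_ne _ _ _ h, hsd]
  · exact hsd

theorem pvGetD_fold (mpb : Int) (ts : List String) (t : String) :
    (ts.foldl (pvAstep mpb) PySem.Dict.empty).getD t 0 = min ((ts.count t : Int)) (pvCap mpb) := by
  induction ts using List.reverseRecOn with
  | nil =>
    simp only [List.foldl_nil, PySem.Dict.getD_empty, List.count_nil, Nat.cast_zero, pvCap]
    split <;> omega
  | append_singleton ts s ih =>
    rw [List.foldl_append, List.foldl_cons, List.foldl_nil]
    by_cases h : t = s
    · subst h
      set D := ts.foldl (pvAstep mpb) PySem.Dict.empty with hD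
      have hsd : (D.setdefault t 0).getD t 0 = D.getD t 0 :=
        PySem.Dict.getD_setdefault_self D t 0 0
      show (pvAstep mpb D t).getD t 0 = _
      unfold pvAstep
      have hc : (0:Int) ≤ (ts.count t : Int) := by positivity
      split
      · rename_i hcond
        rw [hsd, ih] at hcond
        rw [PySem.Dict.getD_insert_self, hsd, ih]
        simp only [pvCap, List.count_append, List.count_cons_self, List.count_nil] at *
        push_cast
        split_ifs at * <;> omega
      · rename_i hcond
        rw [hsd, ih] at hcond
        rw [hsd, ih]
        simp only [pvCap, List.count_append, List.count_cons_self, List.count_nil] at *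
        push_cast
        split_ifs at * <;> omega
    · rw [pvGetD_Astep_ne _ _ _ _ h, ih]
      have : (ts ++ [s]).count t = ts.count t := by
        simp [List.count_append, List.count_cons]
        exact fun hh => h hh.symm
      rw [this]

theorem pvNodup_keys_fold (mpb : Int) (ts : List String) :
    (ts.foldl (pvAstep mpb) PySem.Dict.empty).keys.Nodup := by
  rw [pvKeys_fold]
  have : PySem.Set.update (PySem.Dict.empty : PySem.Dict String Int).keys ts
      = PySem.Set.ofList ts := by
    simp [PySem.Dict.keys_empty, PySem.Set.update_nil_left]
  rw [this]
  exact PySem.Set.nodup_ofList ts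

-- the condition A tests equals the prefix-count condition
theorem pvCond_iff (mpb c : Int) (hc : 0 ≤ c) :
    (min c (pvCap mpb) < mpb ↔ c < mpb) := by
  simp only [pvCap]
  split_ifs with h <;> omega

theorem pvDeduped_fold (results : List (List (String × String))) (mpb : Int) :
    (results.foldl
      (fun (st : PySem.Dict String Int × List (List (String × String))) result =>
        let book_title := pvTitle result
        let bc := st.1.setdefault book_title 0
        if bc.getD book_title 0 < mpb then
          (bc.insert book_title (bc.getD book_title 0 + 1), st.2 ++ [result])
        else (bc, st.2)) (PySem.Dict.empty, [])).2
    = ((PySem.List.enumerate results 0).filter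
        (fun p => decide (((PySem.List.slice (results.map pvTitle) none (some p.1)).count (pvTitle p.2) : Int) < mpb))).map (·.2) := by
  induction results using List.reverseRecOn with
  | nil => rfl
  | append_singleton rs r ih =>
    rw [List.foldl_append, List.foldl_cons, List.foldl_nil]
    have hcnt := pvCounts_fold rs mpb PySem.Dict.empty []
    have hsd : ∀ (d : PySem.Dict String Int), (d.setdefault (pvTitle r) 0).getD (pvTitle r) 0 = d.getD (pvTitle r) 0 :=
      fun d => PySem.Dict.getD_setdefault_self d (pvTitle r) 0 0
    have henum : PySem.List.enumerate (rs ++ [r]) 0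
        = PySem.List.enumerate rs 0 ++ [((rs.length : Int), r)] := by
      rw [PySem.List.enumerate_append]
      simp [PySem.List.enumerate_cons]
    have hmap : (rs ++ [r]).map pvTitle = rs.map pvTitle ++ [pvTitle r] := by simp
    have hslice_last : PySem.List.slice (rs.map pvTitle ++ [pvTitle r]) none (some (rs.length : Int))
        = rs.map pvTitle := by
      rw [PySem.List.slice_to_natCast]
      exact List.take_left' (by simp)
    have hslice_pref : ∀ p ∈ PySem.List.enumerate rs 0,
        PySem.List.slice (rs.map pvTitle ++ [pvTitle r]) none (some p.1)
        = PySem.List.slice (rs.map pvTitle) none (some p.1) := by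
      intro p hp
      obtain ⟨k, hk, rfl⟩ := (PySem.List.mem_enumerate_iff _ _ _).mp hp
      simp only [zero_add]
      rw [PySem.List.slice_to_natCast, PySem.List.slice_to_natCast]
      exact List.take_append_of_le_length (by simp; omega)
    rw [henum, hmap, List.filter_append, List.map_append]
    have hfiltc : (PySem.List.enumerate rs 0).filter
        (fun p => decide (((PySem.List.slice (rs.map pvTitle ++ [pvTitle r]) none (some p.1)).count (pvTitle p.2) : Int) < mpb))
        = (PySem.List.enumerate rs 0).filter
        (fun p => decide (((PySem.List.slice (rs.map pvTitle) none (some p.1)).count (pvTitle p.2) : Int) < mpb)) := by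
      apply List.filter_congr
      intro p hp
      rw [hslice_pref p hp]
    rw [hfiltc, ← ih]
    simp only [List.filter_cons, List.filter_nil, hslice_last]
    have hgd : ((rs.foldl
        (fun (st : PySem.Dict String Int × List (List (String × String))) result =>
          let book_title := pvTitle result
          let bc := st.1.setdefault book_title 0
          if bc.getD book_title 0 < mpb then
            (bc.insert book_title (bc.getD book_title 0 + 1), st.2 ++ [result])
          else (bc, st.2)) (PySem.Dict.empty, [])).1).getD (pvTitle r) 0
        = min (((rs.map pvTitle).count (pvTitle r) : Int)) (pvCap mpb) := by
      rw [hcnt, pvGetD_fold]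
    have hiff := pvCond_iff mpb (((rs.map pvTitle).count (pvTitle r) : Int)) (by positivity)
    rw [hsd, hgd]
    by_cases hlt : ((rs.map pvTitle).count (pvTitle r) : Int) < mpb
    · rw [if_pos (hiff.mpr hlt)]
      simp [hlt]
    · rw [if_neg (fun hmin => hlt (hiff.mp hmin))]
      simp [hlt]

theorem pvItems_fold (mpb : Int) (ts : List String) :
    (ts.foldl (pvAstep mpb) PySem.Dict.empty).items
    = (PySem.Set.ofList ts).map (fun t => (t, min ((ts.count t : Int)) (pvCap mpb))) := by
  rw [PySem.Dict.items_eq_map_keys _ (pvNodup_keys_fold mpb ts) 0, pvKeys_fold]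
  have : PySem.Set.update (PySem.Dict.empty : PySem.Dict String Int).keys ts
      = PySem.Set.ofList ts := by
    simp [PySem.Dict.keys_empty, PySem.Set.update_nil_left]
  rw [this]
  apply List.map_congr_left
  intro t _
  rw [pvGetD_fold]

-- ---- B side: characterisation of the grouping pass ----

-- the positions (as Ints) at which title t occurs
def pvPos (results : List (List (String × String))) (t : String) : List Int :=
  ((PySem.List.enumerate results 0).filter (fun p => pvTitle p.2 == t)).map (·.1)

theorem pvGroups_eq_modify (results : List (List (String × String))) :
    pvGroups results
    = ((PySem.List.enumerate results 0).map (fun p => (pvTitle p.2, p.1))).foldl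
        (fun d q => d.modify q.1 [] (· ++ [q.2])) PySem.Dict.empty := by
  rw [List.foldl_map]
  rfl

theorem pvGroups_getD (results : List (List (String × String))) (t : String) :
    (pvGroups results).getD t [] = pvPos results t := by
  rw [pvGroups_eq_modify, PySem.Dict.getD_foldl_modify_append]
  simp [pvPos, List.filter_map, List.map_map, PySem.Dict.getD_empty, Function.comp_def]

theorem pvGroups_keys (results : List (List (String × String))) :
    (pvGroups results).keys = PySem.Set.ofList (results.map pvTitle) := by
  rw [pvGroups_eq_modify, PySem.Dict.keys_foldl_modify_key]
  rw [show (List.map (fun p => (pvTitle p.2, p.1)) (PySem.List.enumerate results 0)).map (·.1)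
      = results.map pvTitle by
    rw [List.map_map, show ((fun (q : String × Int) => q.1) ∘ fun p => (pvTitle p.2, p.1))
        = pvTitle ∘ (fun (p : Int × List (String × String)) => p.2) from rfl,
      ← List.map_map, PySem.List.map_snd_enumerate]]
  simp [PySem.Dict.keys_empty, PySem.Set.update_nil_left]

theorem pvGroups_nodup (results : List (List (String × String))) :
    (pvGroups results).keys.Nodup := by
  rw [pvGroups_keys]; exact PySem.Set.nodup_ofList _

theorem pvPos_len (results : List (List (String × String))) (t : String) :
    (pvPos results t).length = (results.map pvTitle).count t := by
  unfold pvPos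
  rw [List.length_map, ← List.countP_eq_length_filter, List.count_eq_countP,
    show (fun (p : Int × List (String × String)) => pvTitle p.2 == t)
      = ((fun x => x == t) ∘ pvTitle ∘ (fun (p : Int × List (String × String)) => p.2)) from rfl,
    ← Function.comp_assoc, ← List.countP_map,
    PySem.List.map_snd_enumerate, ← List.countP_map]

theorem mem_pvPos (results : List (List (String × String))) (t : String) (i : Int) :
    i ∈ pvPos results t ↔ ∃ (k : Nat) (_ : k < results.length), i = (k : Int) ∧ pvTitle results[k] = t := by
  unfold pvPos
  simp only [List.mem_map, List.mem_filter, PySem.List.mem_enumerate_iff]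
  constructor
  · rintro ⟨p, ⟨⟨k, hk, rfl⟩, hpt⟩, rfl⟩
    exact ⟨k, hk, by simp, by simpa using hpt⟩
  · rintro ⟨k, hk, rfl, ht⟩
    exact ⟨((k : Int), results[k]), ⟨⟨k, hk, by simp⟩, by simpa using ht⟩, rfl⟩

theorem pvPos_append (rs : List (List (String × String))) (r : List (String × String)) (t : String) :
    pvPos (rs ++ [r]) t = pvPos rs t ++ (if pvTitle r == t then [((rs.length : Int))] else []) := by
  unfold pvPos
  rw [PySem.List.enumerate_append, List.filter_append, List.map_append]
  congr 1
  simp only [PySem.List.enumerate_cons, PySem.List.enumerate_nil, List.filter_cons,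
    List.filter_nil, zero_add]
  by_cases h : pvTitle r == t
  · simp [h]
  · simp [h]

theorem pvPos_lt (results : List (List (String × String))) (t : String) (i : Int)
    (h : i ∈ pvPos results t) : i < (results.length : Int) := by
  obtain ⟨k, hk, rfl, -⟩ := (mem_pvPos results t i).mp h
  exact_mod_cast hk

theorem pvTake_mem (results : List (List (String × String))) :
    ∀ (k : Nat) (hk : k < results.length) (m : Nat),
    (((k : Int) ∈ (pvPos results (pvTitle results[k])).take m)
    ↔ ((results.map pvTitle).take k).count (pvTitle results[k]) < m) := by
  induction results using List.reverseRecOn with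
  | nil => intro k hk; simp at hk
  | append_singleton rs r ih =>
    intro k hk m
    rw [List.length_append, List.length_singleton] at hk
    by_cases hc : k < rs.length
    · have hg : (rs ++ [r])[k] = rs[k] := List.getElem_append_left hc
      rw [hg, pvPos_append, List.take_append, List.mem_append]
      have hnot : ((k : Int)) ∉ (if pvTitle r == pvTitle rs[k] then [((rs.length : Int))] else []).take (m - (pvPos rs (pvTitle rs[k])).length) := by
        intro hmem
        have := List.mem_of_mem_take hmem
        split at this <;> simp at this
        omega
      have htk : ((rs ++ [r]).map pvTitle).take k = (rs.map pvTitle).take k := by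
        rw [List.map_append, List.take_append_of_le_length (by simpa using Nat.le_of_lt hc)]
      rw [htk]
      constructor
      · rintro (h | h)
        · exact (ih k hc m).mp h
        · exact absurd h hnot
      · intro h
        exact Or.inl ((ih k hc m).mpr h)
    · have hke : k = rs.length := by omega
      subst hke
      have hg : (rs ++ [r])[rs.length] = r := by
        rw [List.getElem_append_right (Nat.le_refl _)]
        simp
      rw [hg, pvPos_append, List.take_append, List.mem_append]
      have hself : (pvTitle r == pvTitle r) = true := by simp
      rw [hself, if_pos rfl]
      have hnot1 : ((rs.length : Int)) ∉ (pvPos rs (pvTitle r)).take m := by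
        intro hmem
        have := pvPos_lt rs (pvTitle r) _ (List.mem_of_mem_take hmem)
        omega
      have htk : ((rs ++ [r]).map pvTitle).take rs.length = rs.map pvTitle := by
        rw [List.map_append]
        exact List.take_left' (by simp)
      rw [htk, pvPos_len]
      constructor
      · rintro (h | h)
        · exact absurd h hnot1
        · rcases Nat.lt_or_ge ((rs.map pvTitle).count (pvTitle r)) m with hlt | hge
          · exact hlt
          · rw [Nat.sub_eq_zero_of_le hge] at h
            simp at h
      · intro h
        right
        have hpos : 0 < m - (rs.map pvTitle).count (pvTitle r) := by omega
        rcases Nat.exists_eq_succ_of_ne_zero (Nat.pos_iff_ne_zero.mp hpos) with ⟨j, hj⟩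
        rw [hj]
        simp

theorem mem_foldl_update {α β : Type} [BEq α] [LawfulBEq α] (l : List β) (g : β → List α)
    (s : PySem.Set α) (y : α) :
    (y ∈ l.foldl (fun s x => PySem.Set.update s (g x)) s) ↔ y ∈ s ∨ ∃ x ∈ l, y ∈ g x := by
  induction l generalizing s with
  | nil => simp
  | cons a l ih =>
    rw [List.foldl_cons, ih]
    simp [PySem.Set.mem_update, or_assoc]

theorem pvKept_contains (results : List (List (String × String))) (mpb : Int) (h : 0 ≤ mpb)
    (k : Nat) (hk : k < results.length) :
    PySem.Set.contains
      ((pvGroups results).values.foldl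
        (fun s ps => PySem.Set.update s (PySem.List.slice ps none (some mpb)))
        PySem.Set.empty) (k : Int)
    = decide (((results.map pvTitle).take k).count (pvTitle results[k]) < mpb.toNat) := by
  rw [Bool.eq_iff_iff]
  rw [show (PySem.Set.contains _ ((k : Nat) : Int) = true) ↔ ((k : Nat) : Int) ∈ _ from PySem.Set.contains_iff _ _]
  rw [mem_foldl_update, decide_eq_true_eq]
  have hvals : (pvGroups results).values
      = (pvGroups results).keys.map (fun t => (pvGroups results).getD t []) :=
    PySem.Dict.values_eq_map_keys _ (pvGroups_nodup results) []
  have hslice : ∀ ps : List Int, PySem.List.slice ps none (some mpb) = ps.take mpb.toNat := by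
    intro ps
    rw [show mpb = ((mpb.toNat : Nat) : Int) from (Int.toNat_of_nonneg h).symm,
      PySem.List.slice_to_natCast]
    simp
    omega
  constructor
  · rintro (hf | ⟨ps, hps, hmem⟩)
    · simp [PySem.Set.empty] at hf
    · rw [hvals, List.mem_map] at hps
      obtain ⟨t, ht, rfl⟩ := hps
      rw [pvGroups_getD, hslice] at hmem
      have hmem' := List.mem_of_mem_take hmem
      obtain ⟨k', hk', hkk, hteq⟩ := (mem_pvPos results t _).mp hmem'
      have : k = k' := by exact_mod_cast hkk
      subst this
      rw [← hteq] at hmem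
      exact (pvTake_mem results k hk' mpb.toNat).mp hmem
  · intro hcnt
    right
    refine ⟨pvPos results (pvTitle results[k]), ?_, ?_⟩
    · rw [hvals, List.mem_map]
      refine ⟨pvTitle results[k], ?_, by rw [pvGroups_getD]⟩
      rw [pvGroups_keys, PySem.Set.mem_ofList]
      exact List.mem_map_of_mem (List.getElem_mem hk)
    · rw [hslice]
      exact (pvTake_mem results k hk mpb.toNat).mpr hcnt

-- ===== VERDICT (by name: the statement is the Claim_ definition above) =====
theorem deduplicate_by_book_spec : Claim_equal_deduplicate_by_book := by
  intro results mpb _ hpre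
  unfold Pre_deduplicate_by_book at hpre
  unfold Spec_deduplicate_by_book deduplicate_by_book deduplicate_by_book_alt
  simp only
  rw [Prod.mk.injEq]
  constructor
  · -- deduplicated list
    rw [pvDeduped_fold]
    congr 1
    apply List.filter_congr
    intro p hp
    obtain ⟨k, hk, rfl⟩ := (PySem.List.mem_enumerate_iff _ _ _).mp hp
    simp only [zero_add]
    rw [pvKept_contains results mpb hpre k hk, PySem.List.slice_to_natCast]
    rw [Bool.eq_iff_iff, decide_eq_true_eq, decide_eq_true_eq]
    omega
  · -- distribution
    rw [pvCounts_fold, pvItems_fold,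
      PySem.Dict.items_eq_map_keys _ (pvGroups_nodup results) [], pvGroups_keys, List.map_map]
    apply List.map_congr_left
    intro t _
    simp only [Function.comp_apply]
    rw [pvGroups_getD, pvPos_len]
    have hcap : pvCap mpb = mpb := by unfold pvCap; split_ifs <;> omega
    rw [hcap]
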